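-- pv_equiv track=rewrite | github.com/miliar/Code_Jam_Webscraper | solutions_python/Problem_203/144.py | fill
-- ===== SOURCE A (Python) =====
-- def fill(s):
--     p = ''
--     last = ''
--     first = ''
--     count = 0
--     for x in s:
--         if last == '':
--             if x == '?':
--                 count += 1
--             else:
--                 first = x
--                 p += x
--                 last = x
--         else:
--             if x != '?':
--                 last = x
--             p += last
--     return count * first + p
-- ===== SOURCE B (Python) =====
-- def fill(s):
--     first = next((c for c in s if c != '?'), '')
--     if first == '':
--         return ''
--     last = first
--     result = []
--     for c in s:
--         if c != '?':
--             last = c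
--         result.append(last)
--     return ''.join(result)
-- ===== Notes on version B (the rewrite author's own statement) =====
-- stated objective: simpler
-- what changed: A threads a four-variable state (leading question-mark count, first, last, output string built by repeated concatenation) through one pass and patches the leading run in at the end by string repetition; B first scans for the first non-question-mark character, returns the empty string if there is none, and then does one uniform forward-fill pass with a single last variable into a list joined once.
import Mathlib
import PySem

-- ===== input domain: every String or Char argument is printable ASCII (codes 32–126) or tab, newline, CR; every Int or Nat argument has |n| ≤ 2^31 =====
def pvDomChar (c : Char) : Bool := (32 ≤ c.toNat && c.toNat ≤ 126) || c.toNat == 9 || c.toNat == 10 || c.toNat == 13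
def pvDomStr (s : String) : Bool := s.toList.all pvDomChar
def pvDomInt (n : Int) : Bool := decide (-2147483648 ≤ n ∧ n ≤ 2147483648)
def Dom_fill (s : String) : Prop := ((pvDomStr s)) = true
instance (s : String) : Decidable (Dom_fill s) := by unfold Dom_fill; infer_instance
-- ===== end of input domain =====

-- B replaces A's four-variable stateful pass (leading-'?' count patched in at the end)
-- by a find-first scan followed by one uniform branch-free forward-fill pass: simpler.

-- ===== PORT A =====
-- A's string variables last/first are '' or a single character: modeled as Option Char
-- (none = ''); p and the final return value are built as List Char and joined at the end.
def fillStep (st : List Char × Option Char × Option Char × Nat) (x : Char) :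
    List Char × Option Char × Option Char × Nat :=
  match st with
  | (p, last, first, count) =>
    match last with
    | none =>
      if x = '?' then (p, none, first, count + 1)
      else (p ++ [x], some x, some x, count)
    | some l =>
      let last' := if x ≠ '?' then x else l
      (p ++ [last'], some last', first, count)

-- 'return count * first + p': '' if first is '' (none), else first repeated count times, then p
def fillFinish (r : List Char × Option Char × Option Char × Nat) : List Char :=
  (match r.2.2.1 with | none => [] | some c => List.replicate r.2.2.2 c) ++ r.1

def fill (s : String) : String :=
  String.mk (fillFinish (s.toList.foldl fillStep ([], none, none, 0)))

-- ===== PORT B =====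
def altStep (st : Char × List Char) (c : Char) : Char × List Char :=
  let last := if c ≠ '?' then c else st.1
  (last, st.2 ++ [last])

def fill_alt (s : String) : String :=
  match s.toList.find? (fun c => c ≠ '?') with
  | none => ""
  | some f => String.mk ((s.toList.foldl altStep (f, [])).2)

-- ===== PRECONDITION & SPEC =====
def Spec_fill (s : String) (out : String) : Prop := out = fill_alt s
instance (s : String) (out : String) : Decidable (Spec_fill s out) := by unfold Spec_fill; infer_instance

-- ===== CLAIM (what is proved, stated in full; the proofs are below) =====
def Claim_equal_fill : Prop := ∀ (s : String), Dom_fill s → Spec_fill s (fill s)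

-- ===== LEMMAS AND PROOFS =====

-- the B fold's result list is its accumulator followed by the run from an empty accumulator
theorem altFold_acc (l : List Char) (l0 : Char) (res : List Char) :
    l.foldl altStep (l0, res) =
      ((l.foldl altStep (l0, [])).1, res ++ (l.foldl altStep (l0, [])).2) := by
  induction l generalizing l0 res with
  | nil => simp
  | cons x l ih =>
    simp only [List.foldl_cons, altStep]
    rw [ih (if x ≠ '?' then x else l0) ([] ++ [if x ≠ '?' then x else l0]),
        ih (if x ≠ '?' then x else l0) (res ++ [if x ≠ '?' then x else l0])]
    simp

-- once A's 'last' is set, A's loop appends exactly B's forward-fill run to p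
theorem fold_AB (l : List Char) (l0 : Char) (p : List Char) (first : Option Char) (count : Nat) :
    l.foldl fillStep (p, some l0, first, count) =
      (p ++ (l.foldl altStep (l0, [])).2, some (l.foldl altStep (l0, [])).1, first, count) := by
  induction l generalizing l0 p with
  | nil => simp
  | cons x l ih =>
    simp only [List.foldl_cons, fillStep, altStep]
    rw [ih, altFold_acc l (if x ≠ '?' then x else l0) ([] ++ [if x ≠ '?' then x else l0])]
    simp

-- both results as lists, with A's running leading-'?' count generalized
theorem main_lemma (l : List Char) (count : Nat) :
    fillFinish (l.foldl fillStep ([], none, none, count)) =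
      (match l.find? (fun c => c ≠ '?') with
       | none => []
       | some f => List.replicate count f ++ (l.foldl altStep (f, [])).2) := by
  induction l generalizing count with
  | nil => simp [fillFinish]
  | cons x l ih =>
    by_cases hx : x = '?'
    · subst hx
      have h1 : List.foldl fillStep ([], none, none, count) ('?'::l)
          = List.foldl fillStep ([], none, none, count + 1) l := by
        simp [fillStep]
      have h2 : List.find? (fun c => (c ≠ '?' : Bool)) ('?'::l)
          = List.find? (fun c => (c ≠ '?' : Bool)) l := by
        simp
      rw [h1, ih, h2]
      cases hf : List.find? (fun c => (c ≠ '?' : Bool)) l with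
      | none => rfl
      | some f =>
        have h3 : List.foldl altStep (f, []) ('?'::l) = List.foldl altStep (f, [f]) l := by
          simp [altStep]
        simp only
        rw [h3, altFold_acc l f [f], show List.replicate (count + 1) f = List.replicate count f ++ [f] from List.replicate_succ' ..]
        simp
    · have h1 : List.foldl fillStep ([], none, none, count) (x::l)
          = List.foldl fillStep ([x], some x, some x, count) l := by
        simp [fillStep, hx]
      have h2 : List.find? (fun c => (c ≠ '?' : Bool)) (x::l) = some x := by
        simp [hx]
      have h3 : List.foldl altStep (x, []) (x::l) = List.foldl altStep (x, [x]) l := by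
        simp [altStep, hx]
      rw [h1, fold_AB, h2]
      simp only
      rw [h3, altFold_acc l x [x]]
      simp [fillFinish]

-- ===== VERDICT (by name: the statement is the Claim_ definition above) =====
theorem fill_spec : Claim_equal_fill := by
  intro s _
  unfold Spec_fill fill fill_alt
  rw [main_lemma s.toList 0]
  cases hf : List.find? (fun c => (c ≠ '?' : Bool)) s.toList with
  | none => rfl
  | some f => simp
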